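-- pv_equiv track=rewrite | github.com/aeeons/nana | src/plugins/ContestsSpider/nowcoderSpider.py | changeTime
-- ===== SOURCE A (Python) =====
-- def changeTime(contestTime):
--     # 比赛时间：    2022-04-17 13:00
--     #  至     2022-04-17 18:00
--     #  (时长:5小时)
--
--     newTime = ""
--     block = False
--     for ch in contestTime:
--         if ch == '\n' or (ch == ' ' and block == True):
--             continue
--         if ch == '(':
--             break
--         newTime += ch
--         block = True if ch == ' ' else False
--
--     return newTime[6:]
-- ===== SOURCE B (Python) =====
-- def changeTime(contestTime):
--     # Pipeline: cut at the first '(', drop newlines, collapse runs of spaces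
--     # (keep the first space of each run), then drop the first 6 characters.
--     before, _, _ = contestTime.partition('(')
--     kept = [c for c in before if c != '\n']
--     out = kept[:1]
--     for prev, cur in zip(kept, kept[1:]):
--         if not (prev == ' ' and cur == ' '):
--             out.append(cur)
--     return ''.join(out)[6:]
-- ===== Notes on version B (the rewrite author's own statement) =====
-- stated objective: idiomatic
-- what changed: Replaces A's single stateful character loop (break on '(', newline skip, space-run flag) with a pipeline: partition at the first '(', filter out newlines, collapse adjacent-space runs by a pairwise zip over the cleaned string, then slice off the first 6 characters.
import Mathlib
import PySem

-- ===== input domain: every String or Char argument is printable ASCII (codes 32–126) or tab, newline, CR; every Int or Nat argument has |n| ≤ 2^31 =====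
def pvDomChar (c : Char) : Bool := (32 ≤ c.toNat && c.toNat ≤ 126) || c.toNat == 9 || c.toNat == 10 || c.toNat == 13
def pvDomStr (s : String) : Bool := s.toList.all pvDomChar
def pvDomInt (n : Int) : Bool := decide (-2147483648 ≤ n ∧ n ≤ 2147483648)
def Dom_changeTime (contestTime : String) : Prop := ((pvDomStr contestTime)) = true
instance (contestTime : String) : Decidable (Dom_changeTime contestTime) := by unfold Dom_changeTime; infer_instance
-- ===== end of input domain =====

-- B rebuilds A's stateful cleaning loop as a partition/filter/zip pipeline (idiomatic, same cost).

-- ===== PORT A =====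
-- A's for-loop over the characters: skip '\n' and a space after a space, break at '(',
-- otherwise append the char and record whether it was a space.
def changeTimeLoop : List Char → Bool → List Char
  | [], _ => []
  | c :: t, block =>
    if c == '\n' || (c == ' ' && block) then changeTimeLoop t block
    else if c == '(' then []
    else c :: changeTimeLoop t (c == ' ')

def changeTime (contestTime : String) : String :=
  -- newTime[6:]
  String.ofList (PySem.Chars.slice (changeTimeLoop contestTime.toList false) (some 6) none)

-- ===== PORT B =====
def changeTime_alt (contestTime : String) : String :=
  -- before, _, _ = contestTime.partition('(')  — hand port: the part before the first '('
  -- is exactly takeWhile (≠ '('); exact on every string (whole string when '(' is absent)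
  let before := contestTime.toList.takeWhile (fun c => c ≠ '(')
  -- kept = [c for c in before if c != '\n']
  let kept := before.filter (fun c => c ≠ '\n')
  -- out = kept[:1]; for prev, cur in zip(kept, kept[1:]): append cur unless both are spaces
  let out := (kept.zip (kept.drop 1)).foldl
      (fun out pc => if pc.1 = ' ' ∧ pc.2 = ' ' then out else out ++ [pc.2]) (kept.take 1)
  -- ''.join(out)[6:]
  String.ofList (PySem.Chars.slice out (some 6) none)

-- ===== PRECONDITION & SPEC =====
def Spec_changeTime (contestTime : String) (out : String) : Prop := out = changeTime_alt contestTime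
instance (contestTime : String) (out : String) : Decidable (Spec_changeTime contestTime out) := by unfold Spec_changeTime; infer_instance

-- ===== CLAIM (what is proved, stated in full; the proofs are below) =====
def Claim_equal_changeTime : Prop := ∀ (contestTime : String), Dom_changeTime contestTime → Spec_changeTime contestTime (changeTime contestTime)

-- ===== LEMMAS AND PROOFS =====

-- Collapse of adjacent spaces, phrased as recursion with the previous kept char.
def colRec : Char → List Char → List Char
  | _, [] => []
  | p, c :: t => if p = ' ' ∧ c = ' ' then colRec c t else c :: colRec c t

-- A's loop equals: cut at '(', drop newlines, collapse with previous char p (flag = «p is a space»).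
theorem changeTimeLoop_eq (cs : List Char) (p : Char) :
    changeTimeLoop cs (p == ' ') =
      colRec p ((cs.takeWhile (fun c => c ≠ '(')).filter (fun c => c ≠ '\n')) := by
  induction cs generalizing p with
  | nil => simp [changeTimeLoop, colRec]
  | cons c t ih =>
    by_cases hn : c = '\n'
    · subst hn
      simp [changeTimeLoop, List.takeWhile, ih p]
    · by_cases hp : c = '('
      · subst hp
        simp [changeTimeLoop, List.takeWhile, colRec]
      · by_cases hs : c = ' ' ∧ p = ' '
        · obtain ⟨hc, hpp⟩ := hs; subst hc; subst hpp
          have h := ih ' '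
          simp only [beq_self_eq_true] at h
          simp [changeTimeLoop, List.takeWhile, colRec, h]
        · have h1 : ¬ (c == '\n' || (c == ' ' && (p == ' '))) = true := by
            simp only [Bool.or_eq_true, Bool.and_eq_true, beq_iff_eq]
            tauto
          have h2 : ¬ (p = ' ' ∧ c = ' ') := by tauto
          simp only [changeTimeLoop, h1]
          rw [if_neg (by simp)]
          rw [if_neg (by simpa using hp)]
          rw [List.takeWhile]
          simp only [hp, ne_eq, not_false_iff, decide_true]
          rw [List.filter_cons_of_pos (by simpa using hn)]
          rw [colRec]
          rw [if_neg h2]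
          exact congrArg (c :: ·) (ih c)

-- B's zip-fold equals the same collapse recursion.
theorem foldl_zip_eq (t : List Char) (p : Char) (acc : List Char) :
    ((p :: t).zip t).foldl
        (fun out pc => if pc.1 = ' ' ∧ pc.2 = ' ' then out else out ++ [pc.2]) acc =
      acc ++ colRec p t := by
  induction t generalizing p acc with
  | nil => simp [colRec]
  | cons c t' ih =>
    simp only [List.zip_cons_cons, List.foldl_cons]
    rw [colRec]
    by_cases h : p = ' ' ∧ c = ' '
    · rw [if_pos h, if_pos h, ih c acc]
    · rw [if_neg h, if_neg h, ih c (acc ++ [c])]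
      simp

theorem kept_collapse_eq (kept : List Char) :
    (kept.zip (kept.drop 1)).foldl
        (fun out pc => if pc.1 = ' ' ∧ pc.2 = ' ' then out else out ++ [pc.2]) (kept.take 1) =
      colRec 'x' kept := by
  cases kept with
  | nil => simp [colRec]
  | cons c t =>
    simp only [List.drop_succ_cons, List.drop_zero, List.take_succ_cons, List.take_zero]
    rw [foldl_zip_eq t c [c]]
    rw [colRec, if_neg (by simp)]
    rfl

-- ===== VERDICT (by name: the statement is the Claim_ definition above) =====
theorem changeTime_spec : Claim_equal_changeTime := by
  intro s _
  unfold Spec_changeTime changeTime changeTime_alt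
  dsimp only
  rw [kept_collapse_eq]
  have h : (('x' : Char) == ' ') = false := by decide
  have := changeTimeLoop_eq s.toList 'x'
  rw [h] at this
  rw [this]
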